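-- pv_equiv track=rewrite | github.com/edyhvh/davar | tools/bani/apply.py | split_into_syllables
-- ===== SOURCE A (Python) =====
-- from typing import Dict, Any, List, Optional
--
-- def split_into_syllables(translit: str) -> List[str]:
--     """Simple syllable splitting based on vowels."""
--     # This is a basic implementation - could be improved
--     syllables = []
--     current = ""
--
--     for char in translit:
--         current += char
--         # Split on vowels (very basic)
--         if char in 'aeiouAEIOU':
--             syllables.append(current)
--             current = ""
--
--     if current:
--         syllables.append(current)
--
--     return syllables if syllables else [translit]
-- ===== SOURCE B (Python) =====
-- def split_into_syllables(translit):
--     """Simple syllable splitting based on vowels."""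
--     vowels = 'aeiouAEIOU'
--     syllables = []
--     rest = translit
--     while True:
--         i = next((k for k, c in enumerate(rest) if c in vowels), None)
--         if i is None:
--             break
--         syllables.append(rest[:i + 1])
--         rest = rest[i + 1:]
--     if rest:
--         syllables.append(rest)
--     return syllables if syllables else [translit]
-- ===== Notes on version B (the rewrite author's own statement) =====
-- stated objective: alternative
-- what changed: Instead of accumulating characters one by one and flushing on each vowel, B repeatedly finds the index of the next vowel and slices the string there, cutting whole syllables off the front.
import Mathlib
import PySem

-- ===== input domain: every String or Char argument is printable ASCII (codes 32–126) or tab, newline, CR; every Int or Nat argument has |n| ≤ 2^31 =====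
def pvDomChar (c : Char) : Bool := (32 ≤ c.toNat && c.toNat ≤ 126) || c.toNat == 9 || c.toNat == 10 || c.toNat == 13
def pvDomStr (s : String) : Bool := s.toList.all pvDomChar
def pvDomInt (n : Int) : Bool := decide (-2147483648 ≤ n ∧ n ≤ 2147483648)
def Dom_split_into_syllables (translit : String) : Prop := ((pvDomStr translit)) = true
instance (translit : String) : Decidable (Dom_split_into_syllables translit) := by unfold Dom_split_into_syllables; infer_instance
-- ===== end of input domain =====

-- B slices whole syllables off the front at each next-vowel index instead of accumulating
-- characters one by one; an alternative of the same cost, proved to return the same list.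


-- ===== PORT A =====
-- the vowel set 'aeiouAEIOU'
def pvVowel (c : Char) : Bool := c ∈ "aeiouAEIOU".toList

-- one iteration of A's for-loop: state = (syllables, current)
def pvStepA (st : List String × List Char) (c : Char) : List String × List Char :=
  let cur := st.2 ++ [c]
  if pvVowel c then (st.1 ++ [String.ofList cur], []) else (st.1, cur)

def split_into_syllables (translit : String) : List String :=
  let st := translit.toList.foldl pvStepA ([], [])
  let syllables := if st.2 = [] then st.1 else st.1 ++ [String.ofList st.2]
  if syllables = [] then [translit] else syllables

-- ===== PORT B =====
-- B's while-loop: find the index of the next vowel, cut the syllable off the front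
def pvCut (rest : List Char) : List String :=
  match h : rest.findIdx? pvVowel with
  | some i => String.ofList (rest.take (i + 1)) :: pvCut (rest.drop (i + 1))
  | none => if rest = [] then [] else [String.ofList rest]
termination_by rest.length
decreasing_by
  have := List.findIdx?_eq_some_iff_findIdx_eq.mp h
  simp [List.length_drop]; omega

def split_into_syllables_alt (translit : String) : List String :=
  let syllables := pvCut translit.toList
  if syllables = [] then [translit] else syllables

-- ===== PRECONDITION & SPEC =====
def Spec_split_into_syllables (translit : String) (out : List String) : Prop := out = split_into_syllables_alt translit
instance (translit : String) (out : List String) : Decidable (Spec_split_into_syllables translit out) := by unfold Spec_split_into_syllables; infer_instance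

-- ===== CLAIM (what is proved, stated in full; the proofs are below) =====
def Claim_equal_split_into_syllables : Prop := ∀ (translit : String), Dom_split_into_syllables translit → Spec_split_into_syllables translit (split_into_syllables translit)

-- ===== LEMMAS AND PROOFS =====

-- unfolding B's loop when a next vowel exists at index i
theorem pvCut_some (rest : List Char) (i : Nat) (h : rest.findIdx? pvVowel = some i) :
    pvCut rest = String.ofList (rest.take (i + 1)) :: pvCut (rest.drop (i + 1)) := by
  rw [pvCut]
  split
  · rename_i j hj; rw [h] at hj; cases hj; rfl
  · rename_i hn; rw [h] at hn; cases hn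

-- on a vowel-free rest, B's cut terminates with the final-flush value
theorem pvCut_no_vowel (cur : List Char) (hv : ∀ c ∈ cur, pvVowel c = false) :
    pvCut cur = if cur = [] then [] else [String.ofList cur] := by
  rw [pvCut]
  rw [List.findIdx?_eq_none_iff.mpr hv]

-- loop invariant: flushing A's fold state equals the already-emitted syllables
-- followed by B's cut of (pending current ++ remaining characters)
theorem pvFold_eq_cut (cs : List Char) (sylls : List String) (cur : List Char)
    (hv : ∀ c ∈ cur, pvVowel c = false) :
    (let st := cs.foldl pvStepA (sylls, cur)
     if st.2 = [] then st.1 else st.1 ++ [String.ofList st.2]) = sylls ++ pvCut (cur ++ cs) := by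
  induction cs generalizing sylls cur with
  | nil =>
    simp only [List.foldl_nil, List.append_nil]
    rw [pvCut_no_vowel cur hv]
    split <;> simp_all
  | cons c cs ih =>
    simp only [List.foldl_cons, pvStepA]
    by_cases hc : pvVowel c
    · simp only [hc, if_pos]
      rw [ih _ [] (by simp)]
      have hfind : (cur ++ c :: cs).findIdx? pvVowel = some cur.length := by
        rw [List.findIdx?_append, List.findIdx?_eq_none_iff.mpr hv, List.findIdx?_cons,
          if_pos hc]
        simp
      rw [pvCut_some _ _ hfind]
      have hlen : cur.length + 1 = (cur ++ [c]).length := by simp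
      rw [show cur ++ c :: cs = (cur ++ [c]) ++ cs by simp]
      rw [hlen, List.take_left, List.drop_left]
      simp
    · simp only [hc, if_neg, Bool.false_eq_true, not_false_iff]
      rw [ih _ (cur ++ [c]) (by intro x hx; rcases List.mem_append.mp hx with h | h
                                · exact hv x h
                                · simp_all)]
      simp

-- ===== VERDICT (by name: the statement is the Claim_ definition above) =====
theorem split_into_syllables_spec : Claim_equal_split_into_syllables := by
  intro t _
  show split_into_syllables t = split_into_syllables_alt t
  unfold split_into_syllables split_into_syllables_alt
  have h := pvFold_eq_cut t.toList [] [] (by simp)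
  simp only [List.nil_append] at h
  simp only [h]
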